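-- pv_equiv track=rewrite | github.com/Namania/Tik-Tak-Toe | Tik-Tak-Toe.py | grille_pleine
-- ===== SOURCE A (Python) =====
-- def grille_pleine(G):
--     # Coder par François
--     """
--     paramètre = grille
--     return True si grille pleine return False si grille non pleine
--     """
--
--     Bool = False
--     msg = ''
--
--     for i in range(len(G)):
--         for i2 in range(len(G[i])):
--             if G[i][i2] == (' ', ' '):
--                 msg+='f'
--             else:
--                 msg+='t'
--
--     if msg == 'ttttttttt':
--         Bool = True
--
--     return Bool
-- ===== SOURCE B (Python) =====
-- def grille_pleine(G):
--     cells = [c for row in G for c in row]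
--     return len(cells) == 9 and all(c != (' ', ' ') for c in cells)
-- ===== Notes on version B (the rewrite author's own statement) =====
-- stated objective: simpler
-- what changed: Replaces A's built-up 't'/'f' marker string compared against the literal 'ttttttttt' by a direct decision: flatten the grid and return (cell count == 9) and all cells differ from (' ',' '), short-circuiting on the first empty cell.
import Mathlib
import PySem

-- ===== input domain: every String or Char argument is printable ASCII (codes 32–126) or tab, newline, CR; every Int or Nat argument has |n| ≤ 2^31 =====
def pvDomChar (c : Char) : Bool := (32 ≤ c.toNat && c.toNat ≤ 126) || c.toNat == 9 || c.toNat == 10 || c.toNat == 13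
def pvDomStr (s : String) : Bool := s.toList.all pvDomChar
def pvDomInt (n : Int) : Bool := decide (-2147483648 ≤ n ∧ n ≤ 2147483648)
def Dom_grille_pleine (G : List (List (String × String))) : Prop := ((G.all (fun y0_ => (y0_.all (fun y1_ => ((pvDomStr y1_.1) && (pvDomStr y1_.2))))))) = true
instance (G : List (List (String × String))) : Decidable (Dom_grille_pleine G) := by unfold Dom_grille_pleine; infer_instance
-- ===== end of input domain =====

-- B replaces A's built-up 't'/'f' marker string (compared to the literal "ttttttttt")
-- by a direct decision: flatten the grid and check (count = 9) and no cell equals (' ',' '). Objective: simpler.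

-- ===== PORT A =====
def grille_pleine (G : List (List (String × String))) : Bool :=
  let msg : String :=
    (PySem.List.pyRange 0 G.length 1).foldl (fun msg i =>
      (PySem.List.pyRange 0 (PySem.List.pyGetD G i []).length 1).foldl (fun msg i2 =>
        if PySem.List.pyGetD (PySem.List.pyGetD G i []) i2 (" ", " ") == (" ", " ")
        then msg ++ "f" else msg ++ "t") msg) ""
  let b : Bool := false
  let b : Bool := if msg == "ttttttttt" then true else b
  b

-- ===== PORT B =====
def grille_pleine_alt (G : List (List (String × String))) : Bool :=
  let cells := G.flatMap (fun row => row)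
  (cells.length == 9) && cells.all (fun c => !(c == (" ", " ")))

-- ===== PRECONDITION & SPEC =====
def Spec_grille_pleine (G : List (List (String × String))) (out : Bool) : Prop := out = grille_pleine_alt G
instance (G : List (List (String × String))) (out : Bool) : Decidable (Spec_grille_pleine G out) := by unfold Spec_grille_pleine; infer_instance

-- ===== CLAIM (what is proved, stated in full; the proofs are below) =====
def Claim_equal_grille_pleine : Prop := ∀ (G : List (List (String × String))), Dom_grille_pleine G → Spec_grille_pleine G (grille_pleine G)

-- ===== LEMMAS AND PROOFS =====

-- the marker char A appends for one cell
def pvMark (c : String × String) : Char := if c == (" ", " ") then 'f' else 't'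

theorem pv_inner (row : List (String × String)) (m : String) :
    (row.foldl (fun m c => if c == (" ", " ") then m ++ "f" else m ++ "t") m).toList
      = m.toList ++ row.map pvMark := by
  induction row generalizing m with
  | nil => simp
  | cons c rs ih =>
      cases h : (c == (" ", " ")) <;>
        simp only [List.foldl_cons, h, Bool.false_eq_true] <;>
        rw [ih] <;> simp [pvMark, h]

theorem pv_msg (G : List (List (String × String))) :
    (G.foldl (fun m row =>
        row.foldl (fun m c => if c == (" ", " ") then m ++ "f" else m ++ "t") m) "").toList
      = (G.flatMap (fun row => row)).map pvMark := by
  induction G using List.reverseRecOn with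
  | nil => simp
  | append_singleton rs r ih =>
      rw [List.foldl_append, List.foldl_cons, List.foldl_nil, pv_inner, ih]
      simp [List.flatMap_append]

theorem pv_mark_t (c : String × String) : (pvMark c = 't') ↔ ¬(c = (" ", " ")) := by
  by_cases h : c = (" ", " ") <;> simp [pvMark, h]

-- ===== VERDICT (by name: the statement is the Claim_ definition above) =====
theorem grille_pleine_spec : Claim_equal_grille_pleine := by
  intro G _
  unfold Spec_grille_pleine grille_pleine grille_pleine_alt
  have houter : (PySem.List.pyRange 0 (G.length : Int) 1).foldl (fun msg i =>
      (PySem.List.pyRange 0 ((PySem.List.pyGetD G i []).length : Int) 1).foldl (fun msg i2 =>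
        if PySem.List.pyGetD (PySem.List.pyGetD G i []) i2 (" ", " ") == (" ", " ")
        then msg ++ "f" else msg ++ "t") msg) ""
      = G.foldl (fun msg row =>
          (PySem.List.pyRange 0 ((row : List (String × String)).length : Int) 1).foldl (fun msg i2 =>
            if PySem.List.pyGetD row i2 (" ", " ") == (" ", " ")
            then msg ++ "f" else msg ++ "t") msg) "" := by
    simpa using PySem.List.foldl_pyRange_zero_pyGetD'
      (xs := G) (d := ([] : List (String × String)))
      (f := fun msg row =>
        (PySem.List.pyRange 0 ((row : List (String × String)).length : Int) 1).foldl (fun msg i2 =>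
          if PySem.List.pyGetD row i2 (" ", " ") == (" ", " ")
          then msg ++ "f" else msg ++ "t") msg) (init := "")
  have hinner : ∀ (row : List (String × String)) (m : String),
      (PySem.List.pyRange 0 ((row : List (String × String)).length : Int) 1).foldl (fun msg i2 =>
        if PySem.List.pyGetD row i2 (" ", " ") == (" ", " ")
        then msg ++ "f" else msg ++ "t") m
      = row.foldl (fun m c => if c == (" ", " ") then m ++ "f" else m ++ "t") m := by
    intro row m
    simpa using PySem.List.foldl_pyRange_zero_pyGetD'
      (xs := row) (d := ((" ", " ") : String × String))
      (f := fun m c => if c == (" ", " ") then m ++ "f" else m ++ "t") (init := m)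
  rw [houter]
  simp only [hinner]
  set cells := G.flatMap (fun row => row) with hcells
  set msg := G.foldl (fun m row =>
      row.foldl (fun m c => if c == (" ", " ") then m ++ "f" else m ++ "t") m) "" with hmsg
  have key : (msg == "ttttttttt") = ((cells.length == 9) && cells.all (fun c => !(c == (" ", " ")))) := by
    rw [Bool.eq_iff_iff]
    simp only [beq_iff_eq, Bool.and_eq_true, List.all_eq_true, Bool.not_eq_eq_eq_not,
      Bool.not_true, beq_eq_false_iff_ne, ne_eq]
    rw [String.ext_iff, hmsg, pv_msg]
    have h9 : "ttttttttt".toList = List.replicate 9 't' := by decide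
    rw [h9, List.eq_replicate_iff]
    constructor
    · rintro ⟨hl, hall⟩
      refine ⟨by rw [List.length_map] at hl; exact hl, fun c hc => (pv_mark_t c).mp (hall _ (List.mem_map_of_mem hc))⟩
    · rintro ⟨hl, hall⟩
      refine ⟨by rw [List.length_map]; exact hl, ?_⟩
      intro b hb
      obtain ⟨c, hc, rfl⟩ := List.mem_map.mp hb
      exact (pv_mark_t c).mpr (hall c hc)
  simp [key]
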